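-- pv_equiv track=rewrite | github.com/JudeKLevine/Defi-turing | Defi Turing168.py | P_ou_I
-- ===== SOURCE A (Python) =====
-- def P_ou_I(n):
--     P = ['0','2','4','6','8']
--     I = ['1','3','5','7','9']
--     a = 0
--     Char = str(n)
--     if Char[0] in P:
--         for i in Char:
--             if i in P: a = a + 1
--     if Char[0] in I:
--         for i in Char:
--             if i in I : a = a + 1
--     if a == len(Char): return 1
--     else : return 0
-- ===== SOURCE B (Python) =====
-- def P_ou_I(n):
--     kinds = {0 if c in '02468' else 1 if c in '13579' else 2 for c in str(n)}
--     return 1 if kinds == {0} or kinds == {1} else 0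
-- ===== Notes on version B (the rewrite author's own statement) =====
-- stated objective: idiomatic
-- what changed: Instead of counting characters matching the first character's parity class and comparing the count to the string length (two guarded loops), B makes one pass building the set of parity classes (even, odd, other) and reports success exactly when that set is a singleton even or singleton odd class.
import Mathlib
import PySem

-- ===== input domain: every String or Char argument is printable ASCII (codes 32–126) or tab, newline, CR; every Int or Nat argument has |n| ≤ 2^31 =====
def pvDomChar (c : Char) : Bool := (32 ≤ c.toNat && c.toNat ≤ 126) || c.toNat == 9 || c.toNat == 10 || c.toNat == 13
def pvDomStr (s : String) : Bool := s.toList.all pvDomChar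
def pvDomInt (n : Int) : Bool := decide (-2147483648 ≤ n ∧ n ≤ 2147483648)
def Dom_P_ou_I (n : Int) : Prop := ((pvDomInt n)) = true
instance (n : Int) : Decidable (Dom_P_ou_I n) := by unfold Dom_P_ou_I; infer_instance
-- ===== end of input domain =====

-- B replaces A's first-char-parity counting and length comparison by a one-pass set of
-- parity classes compared against {0}/{1} (idiomatic; same cost).

-- ===== PORT A =====
def P_ou_I (n : Int) : Int :=
  let P : List Char := ['0','2','4','6','8']
  let I : List Char := ['1','3','5','7','9']
  let s := PySem.Int.toChars n          -- Char = str(n)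
  match PySem.List.pyGet? s 0 with      -- Char[0]; str(n) is never empty, so the none branch is unreachable
  | none => 0
  | some c0 =>
    let a : Int := 0
    let a := if c0 ∈ P then s.foldl (fun a i => if i ∈ P then a + 1 else a) a else a
    let a := if c0 ∈ I then s.foldl (fun a i => if i ∈ I then a + 1 else a) a else a
    if a = (s.length : Int) then 1 else 0

-- ===== PORT B =====
-- 'c in "02468"' on a single character is exactly membership in the list of those characters
def pvKind (c : Char) : Int :=
  if c ∈ ['0','2','4','6','8'] then 0 else if c ∈ ['1','3','5','7','9'] then 1 else 2

def P_ou_I_alt (n : Int) : Int :=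
  let kinds := PySem.Set.ofList ((PySem.Int.toChars n).map pvKind)
  if (PySem.Set.equal kinds (PySem.Set.ofList [0]) || PySem.Set.equal kinds (PySem.Set.ofList [1])) then 1 else 0

-- ===== PRECONDITION & SPEC =====
def Spec_P_ou_I (n : Int) (out : Int) : Prop := out = P_ou_I_alt n
instance (n : Int) (out : Int) : Decidable (Spec_P_ou_I n out) := by unfold Spec_P_ou_I; infer_instance

-- ===== CLAIM (what is proved, stated in full; the proofs are below) =====
def Claim_equal_P_ou_I : Prop := ∀ (n : Int), Dom_P_ou_I n → Spec_P_ou_I n (P_ou_I n)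

-- ===== LEMMAS AND PROOFS =====

lemma toDigitsCore_len_mono (b f : Nat) : ∀ (n : Nat) (lst : List Char),
    lst.length ≤ (Nat.toDigitsCore b f n lst).length := by
  induction f with
  | zero => intro n lst; simp [Nat.toDigitsCore]
  | succ f ih =>
    intro n lst
    simp only [Nat.toDigitsCore]
    split
    · simp
    · exact le_trans (by simp) (ih (n / b) _)

lemma toChars_ne_nil (n : Int) : PySem.Int.toChars n ≠ [] := by
  unfold PySem.Int.toChars
  split
  · simp
  · intro h
    have := toDigitsCore_len_mono 10 (n.toNat) (n.toNat / 10) [Nat.digitChar (n.toNat % 10)]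
    simp only [Nat.toDigits] at h
    rw [Nat.toDigitsCore] at h
    split at h
    · simp at h
    · rw [h] at this; simp at this

lemma PI_disjoint (c : Char) (h : c ∈ (['0','2','4','6','8'] : List Char)) :
    c ∉ (['1','3','5','7','9'] : List Char) := by fin_cases h <;> decide

lemma pvKind_P (c : Char) (h : c ∈ (['0','2','4','6','8'] : List Char)) : pvKind c = 0 := by
  simp [pvKind, h]

lemma pvKind_I (c : Char) (h : c ∈ (['1','3','5','7','9'] : List Char)) : pvKind c = 1 := by
  fin_cases h <;> decide

lemma pvKind_other (c : Char) (h0 : c ∉ (['0','2','4','6','8'] : List Char))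
    (h1 : c ∉ (['1','3','5','7','9'] : List Char)) : pvKind c = 2 := by
  simp [pvKind, h0, h1]

lemma equal_zero_iff (L : List Char) :
    (PySem.Set.ofList (L.map pvKind)).equal (PySem.Set.ofList [(0 : Int)]) = true ↔
      (∀ c ∈ L, c ∈ (['0','2','4','6','8'] : List Char)) ∧ L ≠ [] := by
  rw [PySem.Set.equal_iff]
  simp only [PySem.Set.mem_ofList, List.mem_map, List.mem_singleton]
  constructor
  · intro h
    constructor
    · intro c hc
      have h0 : pvKind c = 0 := (h (pvKind c)).mp ⟨c, hc, rfl⟩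
      by_contra hP
      by_cases hI : c ∈ (['1','3','5','7','9'] : List Char)
      · rw [pvKind_I c hI] at h0; exact absurd h0 (by norm_num)
      · rw [pvKind_other c hP hI] at h0; exact absurd h0 (by norm_num)
    · rintro rfl
      have := (h 0).mpr rfl
      simp at this
  · rintro ⟨hall, hne⟩ x
    constructor
    · rintro ⟨c, hc, rfl⟩; exact pvKind_P c (hall c hc)
    · rintro rfl
      rcases List.exists_mem_of_ne_nil L hne with ⟨c, hc⟩
      exact ⟨c, hc, pvKind_P c (hall c hc)⟩

lemma equal_one_iff (L : List Char) :
    (PySem.Set.ofList (L.map pvKind)).equal (PySem.Set.ofList [(1 : Int)]) = true ↔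
      (∀ c ∈ L, c ∈ (['1','3','5','7','9'] : List Char)) ∧ L ≠ [] := by
  rw [PySem.Set.equal_iff]
  simp only [PySem.Set.mem_ofList, List.mem_map, List.mem_singleton]
  constructor
  · intro h
    constructor
    · intro c hc
      have h0 : pvKind c = 1 := (h (pvKind c)).mp ⟨c, hc, rfl⟩
      by_contra hI
      by_cases hP : c ∈ (['0','2','4','6','8'] : List Char)
      · rw [pvKind_P c hP] at h0; exact absurd h0 (by norm_num)
      · rw [pvKind_other c hP hI] at h0; exact absurd h0 (by norm_num)
    · rintro rfl
      have := (h 1).mpr rfl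
      simp at this
  · rintro ⟨hall, hne⟩ x
    constructor
    · rintro ⟨c, hc, rfl⟩; exact pvKind_I c (hall c hc)
    · rintro rfl
      rcases List.exists_mem_of_ne_nil L hne with ⟨c, hc⟩
      exact ⟨c, hc, pvKind_I c (hall c hc)⟩

lemma agree_core (c0 : Char) (t : List Char) :
    (let P : List Char := ['0','2','4','6','8']
     let I : List Char := ['1','3','5','7','9']
     let s := c0 :: t
     let a : Int := 0
     let a := if c0 ∈ P then s.foldl (fun a i => if i ∈ P then a + 1 else a) a else a
     let a := if c0 ∈ I then s.foldl (fun a i => if i ∈ I then a + 1 else a) a else a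
     if a = (s.length : Int) then 1 else 0) =
    (let kinds := PySem.Set.ofList ((c0 :: t).map pvKind)
     if (PySem.Set.equal kinds (PySem.Set.ofList [0]) || PySem.Set.equal kinds (PySem.Set.ofList [1])) then (1 : Int) else 0) := by
  dsimp only
  by_cases h0 : c0 ∈ (['0','2','4','6','8'] : List Char)
  · have h1 : c0 ∉ (['1','3','5','7','9'] : List Char) := PI_disjoint c0 h0
    rw [if_pos h0, if_neg h1, PySem.List.foldl_ite_add_one]
    have hset1 : (PySem.Set.ofList ((c0 :: t).map pvKind)).equal (PySem.Set.ofList [(1 : Int)]) = false := by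
      rw [Bool.eq_false_iff]
      intro hq
      exact h1 (((equal_one_iff (c0 :: t)).mp hq).1 c0 (by simp))
    rw [hset1, Bool.or_false]
    by_cases hall : ∀ c ∈ (c0 :: t), c ∈ (['0','2','4','6','8'] : List Char)
    · have hcnt : List.countP (fun x => decide (x ∈ (['0','2','4','6','8'] : List Char))) (c0 :: t) = (c0 :: t).length :=
        (List.countP_eq_length).mpr (fun a ha => by simpa using hall a ha)
      rw [hcnt, (equal_zero_iff (c0 :: t)).mpr ⟨hall, by simp⟩]
      simp
    · have hcnt : List.countP (fun x => decide (x ∈ (['0','2','4','6','8'] : List Char))) (c0 :: t) ≠ (c0 :: t).length := by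
        intro hc
        exact hall (fun a ha => by simpa using (List.countP_eq_length).mp hc a ha)
      have hset0 : (PySem.Set.ofList ((c0 :: t).map pvKind)).equal (PySem.Set.ofList [(0 : Int)]) = false := by
        rw [Bool.eq_false_iff]
        intro hq
        exact hall ((equal_zero_iff (c0 :: t)).mp hq).1
      rw [hset0]
      have hcnt' : List.countP (fun x => decide (x ∈ (['0','2','4','6','8'] : List Char))) (c0 :: t) ≠ t.length + 1 := by
        simpa using hcnt
      split_ifs with hA hB <;>
        first
          | rfl
          | (exfalso; rw [List.length_cons] at hA; push_cast at hA; omega)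
  · by_cases h1 : c0 ∈ (['1','3','5','7','9'] : List Char)
    · rw [if_neg h0, if_pos h1, PySem.List.foldl_ite_add_one]
      have hset0 : (PySem.Set.ofList ((c0 :: t).map pvKind)).equal (PySem.Set.ofList [(0 : Int)]) = false := by
        rw [Bool.eq_false_iff]
        intro hq
        exact h0 (((equal_zero_iff (c0 :: t)).mp hq).1 c0 (by simp))
      rw [hset0, Bool.false_or]
      by_cases hall : ∀ c ∈ (c0 :: t), c ∈ (['1','3','5','7','9'] : List Char)
      · have hcnt : List.countP (fun x => decide (x ∈ (['1','3','5','7','9'] : List Char))) (c0 :: t) = (c0 :: t).length :=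
          (List.countP_eq_length).mpr (fun a ha => by simpa using hall a ha)
        rw [hcnt, (equal_one_iff (c0 :: t)).mpr ⟨hall, by simp⟩]
        simp
      · have hcnt : List.countP (fun x => decide (x ∈ (['1','3','5','7','9'] : List Char))) (c0 :: t) ≠ (c0 :: t).length := by
          intro hc
          exact hall (fun a ha => by simpa using (List.countP_eq_length).mp hc a ha)
        have hset1 : (PySem.Set.ofList ((c0 :: t).map pvKind)).equal (PySem.Set.ofList [(1 : Int)]) = false := by
          rw [Bool.eq_false_iff]
          intro hq
          exact hall ((equal_one_iff (c0 :: t)).mp hq).1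
        rw [hset1]
        have hcnt' : List.countP (fun x => decide (x ∈ (['1','3','5','7','9'] : List Char))) (c0 :: t) ≠ t.length + 1 := by
          simpa using hcnt
        split_ifs with hA hB <;>
          first
            | rfl
            | (exfalso; rw [List.length_cons] at hA; push_cast at hA; omega)
    · rw [if_neg h0, if_neg h1]
      have hset0 : (PySem.Set.ofList ((c0 :: t).map pvKind)).equal (PySem.Set.ofList [(0 : Int)]) = false := by
        rw [Bool.eq_false_iff]
        intro hq
        exact h0 (((equal_zero_iff (c0 :: t)).mp hq).1 c0 (by simp))
      have hset1 : (PySem.Set.ofList ((c0 :: t).map pvKind)).equal (PySem.Set.ofList [(1 : Int)]) = false := by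
        rw [Bool.eq_false_iff]
        intro hq
        exact h1 (((equal_one_iff (c0 :: t)).mp hq).1 c0 (by simp))
      rw [hset0, hset1]
      split_ifs with hA hB <;>
        first
          | rfl
          | (exfalso; rw [List.length_cons] at hA; push_cast at hA; omega)
          | (exfalso; simp_all)

-- ===== VERDICT (by name: the statement is the Claim_ definition above) =====
theorem P_ou_I_spec : Claim_equal_P_ou_I := by
  intro n _
  unfold Spec_P_ou_I P_ou_I P_ou_I_alt
  cases hL : PySem.Int.toChars n with
  | nil => exact absurd hL (toChars_ne_nil n)
  | cons c0 t =>
    dsimp only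
    rw [show PySem.List.pyGet? (c0::t) 0 = some c0 from by simp [PySem.List.pyGet?, PySem.List.pyIdx?]]
    exact agree_core c0 t
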